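-- pv_equiv track=rewrite | github.com/SaiChandraCh/IB | src/week_2/day_7_2D_arrays/assignment/3_kingdom_war.py | solve
-- ===== SOURCE A (Python) =====
-- def solve(A):
--     m = len(A)
--     n = len(A[0])
--     for i in range(m):
--         temp = 0
--         for j in range(n-1,-1,-1):
--             temp += A[i][j]
--             A[i][j] = temp
--
--     for j in range(n):
--         temp = 0
--         for i in range(m-1,-1,-1):
--             temp += A[i][j]
--             A[i][j] = temp
--     max = A[0][0]
--     for i in range(m):
--         for j in range(n):
--             if A[i][j] > max:
--                 max = A[i][j]
--
--     return max
-- ===== SOURCE B (Python) =====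
-- def solve(A):
--     # Single downward-rightward sweep: 2D inclusion-exclusion recurrence builds the
--     # suffix-sum matrix in place (same mutation of A as the original's two passes),
--     # tracking no separate max pass state; the max is taken over the finished cells.
--     m = len(A)
--     n = len(A[0])
--     for i in range(m - 1, -1, -1):
--         for j in range(n - 1, -1, -1):
--             A[i][j] += (A[i + 1][j] if i + 1 < m else 0) \
--                      + (A[i][j + 1] if j + 1 < n else 0) \
--                      - (A[i + 1][j + 1] if i + 1 < m and j + 1 < n else 0)
--     return max(x for row in A for x in row[:n])
-- ===== Notes on version B (the rewrite author's own statement) =====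
-- stated objective: alternative
-- what changed: Replaces the two separable directional suffix-sum passes plus a separate max scan by one bottom-up right-to-left sweep using the 2D inclusion-exclusion recurrence, with the max taken by the builtin over the finished matrix.
import Mathlib
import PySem

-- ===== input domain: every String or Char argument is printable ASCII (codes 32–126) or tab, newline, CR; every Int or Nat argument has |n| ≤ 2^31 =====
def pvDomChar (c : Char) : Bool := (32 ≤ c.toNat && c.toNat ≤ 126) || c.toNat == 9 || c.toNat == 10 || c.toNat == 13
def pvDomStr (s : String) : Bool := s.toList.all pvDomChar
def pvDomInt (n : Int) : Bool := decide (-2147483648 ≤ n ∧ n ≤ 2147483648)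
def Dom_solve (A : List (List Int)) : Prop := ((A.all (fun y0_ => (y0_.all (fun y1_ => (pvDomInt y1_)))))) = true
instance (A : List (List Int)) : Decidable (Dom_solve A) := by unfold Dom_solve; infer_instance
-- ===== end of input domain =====

-- B replaces A's two directional suffix-sum passes plus a separate max scan by one
-- bottom-up right-to-left inclusion-exclusion sweep and a builtin max; same return value
-- and (in Python) the same in-place mutation of A on the first n columns.

-- ===== PORT A =====
-- inner loop 'for j in range(n-1,-1,-1): temp += A[i][j]; A[i][j] = temp' as the
-- right-to-left structural recursion over the row's first n cells (same running sum)
def suffRow : List Int → List Int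
  | [] => []
  | x :: xs => let r := suffRow xs; (x + r.headD 0) :: r

-- column pass 'for j in range(n): for i in range(m-1,-1,-1): temp += A[i][j]; A[i][j] = temp'
-- realized row-wise bottom-up: columns are independent, and each cell A[i][j] (j < n)
-- receives exactly A[i][j] + A[i+1][j]-already-updated, i.e. the componentwise add of the
-- updated row below on the first n columns
def addTakeN (n : Nat) (r b : List Int) : List Int :=
  (List.zipWith (· + ·) (r.take n) (b.take n)) ++ r.drop n

def colPass (n : Nat) : List (List Int) → List (List Int)
  | [] => []
  | r :: rest =>
    match colPass n rest with
    | [] => [r]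
    | b :: t => addTakeN n r b :: b :: t

def solve (A : List (List Int)) : Int :=
  let n := (A.headD []).length
  let M := colPass n (A.map (fun r => suffRow (r.take n) ++ r.drop n))
  -- max = A[0][0]; then the double scan with 'if A[i][j] > max'
  let init := (M.headD []).headD 0
  M.foldl (fun mx row => (row.take n).foldl (fun mx x => if x > mx then x else mx) mx) init

-- ===== PORT B =====
-- inner loop of the sweep: A[i][j] += below[j] + new[j+1] - below[j+1], guards → headD 0;
-- b is the already-updated row below (restricted to the first n columns), [] for the bottom row
def sweepRow : List Int → List Int → List Int
  | [], _ => []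
  | x :: xs, b =>
    let rest := sweepRow xs b.tail
    (x + b.headD 0 + rest.headD 0 - b.tail.headD 0) :: rest

def sweep (n : Nat) : List (List Int) → List (List Int)
  | [] => []
  | r :: rest =>
    let below := sweep n rest
    (sweepRow (r.take n) ((below.headD []).take n) ++ r.drop n) :: below

def solve_alt (A : List (List Int)) : Int :=
  let n := (A.headD []).length
  let M := sweep n A
  -- max(x for row in A for x in row[:n])
  match PySem.List.max? (M.flatMap (fun r => r.take n)) (fun x => x) with
  | some v => v
  | none => 0

-- ===== PRECONDITION & SPEC =====
-- Pre_ excludes exactly the inputs where Python A raises IndexError: an empty outer list or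
-- empty first row (A[0][0] / len(A[0]) fails), or a later row shorter than row 0.
def Pre_solve (A : List (List Int)) : Prop :=
  A ≠ [] ∧ 0 < (A.headD []).length ∧ ∀ r ∈ A, (A.headD []).length ≤ r.length
instance (A : List (List Int)) : Decidable (Pre_solve A) := by unfold Pre_solve; infer_instance
def pvWitness_solve : List (List Int) := [[1, -2], [3, 4]]

def Spec_solve (A : List (List Int)) (out : Int) : Prop := out = solve_alt A
instance (A : List (List Int)) (out : Int) : Decidable (Spec_solve A out) := by unfold Spec_solve; infer_instance

-- ===== CLAIM (what is proved, stated in full; the proofs are below) =====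
def Claim_equal_solve : Prop := ∀ (A : List (List Int)), Dom_solve A → Pre_solve A → Spec_solve A (solve A)

-- ===== LEMMAS AND PROOFS =====

theorem length_suffRow (l : List Int) : (suffRow l).length = l.length := by
  induction l with
  | nil => rfl
  | cons x xs ih => simp [suffRow, ih]

theorem length_sweepRow (xs b : List Int) : (sweepRow xs b).length = xs.length := by
  induction xs generalizing b with
  | nil => rfl
  | cons x xs ih => simp [sweepRow, ih]

-- the sweep's cell formula is exactly 'row suffix sums plus the updated row below'
theorem sweepRow_eq (xs b : List Int) (h : b.length = xs.length) :
    sweepRow xs b = List.zipWith (· + ·) (suffRow xs) b := by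
  induction xs generalizing b with
  | nil => cases b <;> simp_all [sweepRow]
  | cons x xs ih =>
    cases b with
    | nil => simp at h
    | cons y ys =>
      have h' : ys.length = xs.length := by simpa using h
      simp only [sweepRow, List.tail_cons, List.headD_cons, ih ys h']
      cases xs with
      | nil =>
        cases ys with
        | nil => simp [suffRow]
        | cons _ _ => simp at h'
      | cons x' xs' =>
        cases ys with
        | nil => simp at h'
        | cons y' ys' =>
          simp only [suffRow, List.zipWith_cons_cons, List.headD_cons]
          congr 1
          ring

theorem sweepRow_nil (xs : List Int) : sweepRow xs [] = suffRow xs := by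
  induction xs with
  | nil => rfl
  | cons x xs ih => simp [sweepRow, suffRow, ih]

theorem length_sweep (n : Nat) (A : List (List Int)) : (sweep n A).length = A.length := by
  induction A with
  | nil => rfl
  | cons r rest ih => simp [sweep, ih]

theorem sweep_row_length (n : Nat) (A : List (List Int)) :
    ∀ r' ∈ sweep n A, ∃ r ∈ A, r'.length = r.length := by
  induction A with
  | nil => simp [sweep]
  | cons r rest ih =>
    intro r' hr'
    simp only [sweep, List.mem_cons] at hr'
    rcases hr' with h | h
    · exact ⟨r, List.mem_cons_self, by
        subst h
        simp [length_sweepRow, List.length_take, List.length_drop]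
        omega⟩
    · rcases ih r' h with ⟨r0, hr0, hl⟩
      exact ⟨r0, List.mem_cons_of_mem _ hr0, hl⟩

-- the two matrix computations agree on rectangular-enough input
theorem sweep_eq_colPass (n : Nat) (A : List (List Int)) (h : ∀ r ∈ A, n ≤ r.length) :
    sweep n A = colPass n (A.map (fun r => suffRow (r.take n) ++ r.drop n)) := by
  induction A with
  | nil => rfl
  | cons r rest ih =>
    have hrest : ∀ r' ∈ rest, n ≤ r'.length := fun r' hr' => h r' (List.mem_cons_of_mem _ hr')
    have hr : n ≤ r.length := h r List.mem_cons_self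
    have htk : (r.take n).length = n := by simp [List.length_take]; omega
    simp only [sweep, List.map_cons, colPass, ← ih hrest]
    cases hS : sweep n rest with
    | nil => simp [sweepRow_nil]
    | cons b t =>
      have hb : n ≤ b.length := by
        rcases sweep_row_length n rest b (by simp [hS]) with ⟨r0, hr0, hl⟩
        exact hl ▸ hrest r0 hr0
      have hbt : (b.take n).length = (r.take n).length := by
        simp [List.length_take, htk]; omega
      simp only [List.headD_cons]
      congr 1
      rw [sweepRow_eq _ _ hbt]
      simp only [addTakeN]
      have h1 : (suffRow (r.take n) ++ r.drop n).take n = suffRow (r.take n) := by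
        rw [List.take_append_of_le_length (by rw [length_suffRow, htk])]
        rw [List.take_of_length_le (by rw [length_suffRow, htk])]
      have h2 : (suffRow (r.take n) ++ r.drop n).drop n = r.drop n := by
        rw [List.drop_append_of_le_length (by rw [length_suffRow, htk])]
        have : (suffRow (r.take n)).drop n = [] :=
          List.drop_eq_nil_of_le (by rw [length_suffRow, htk])
        simp [this]
      rw [h1, h2]

theorem if_gt_eq_max (mx x : Int) : (if x > mx then x else mx) = max mx x := by
  rw [max_def]; split_ifs <;> omega

theorem foldl_rows_eq_flatMap (M : List (List Int)) (n : Nat) (init : Int) :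
    M.foldl (fun mx row => (row.take n).foldl (fun mx x => if x > mx then x else mx) mx) init
      = (M.flatMap (fun r => r.take n)).foldl max init := by
  have hf : (fun (mx x : Int) => if x > mx then x else mx) = fun mx x => max mx x :=
    funext fun a => funext fun b => if_gt_eq_max a b
  rw [hf]
  induction M generalizing init with
  | nil => rfl
  | cons r rest ih =>
    simp only [List.foldl_cons, List.flatMap_cons, List.foldl_append, ih]

-- ===== VERDICT (by name: the statement is the Claim_ definition above) =====
theorem solve_spec : Claim_equal_solve := by
  intro A _ hPre
  obtain ⟨hne, hn, hrows⟩ := hPre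
  unfold Spec_solve solve solve_alt
  cases A with
  | nil => exact absurd rfl hne
  | cons r0 rest =>
    simp only [List.headD_cons] at hn hrows ⊢
    set n := r0.length with hn_def
    rw [← sweep_eq_colPass n (r0 :: rest) hrows]
    set M := sweep n (r0 :: rest) with hM
    rw [foldl_rows_eq_flatMap]
    -- M is nonempty and its first row's first n cells are nonempty
    cases hMc : M with
    | nil =>
      exfalso
      have hl := length_sweep n (r0 :: rest)
      rw [← hM, hMc] at hl
      simp at hl
    | cons m0 mt =>
      have hm0len : 0 < m0.length := by
        rcases sweep_row_length n (r0 :: rest) m0 (by simp [← hM, hMc]) with ⟨ra, hra, hl⟩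
        have h1 := hrows ra hra
        exact hl.symm ▸ lt_of_lt_of_le hn h1
      have hm0 : ∃ e es, m0.take n = e :: es := by
        cases hc : m0.take n with
        | nil =>
          exfalso
          have : (m0.take n).length = 0 := by rw [hc]; rfl
          rw [List.length_take] at this
          omega
        | cons e es => exact ⟨e, es, rfl⟩
      rcases hm0 with ⟨e, es, he⟩
      have hhead : m0.headD 0 = e := by
        cases hnn : n with
        | zero => omega
        | succ k =>
          cases m0 with
          | nil => simp at hm0len
          | cons a tl =>
            rw [hnn, List.take_succ_cons] at he
            injection he with h1 _
      simp only [List.flatMap_cons, he, List.headD_cons, hhead]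
      rw [List.cons_append, List.foldl_cons, max_self,
        PySem.List.max?_id_cons]
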